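-- pv_equiv track=rewrite | github.com/Yuandiaodiaodiao/toolman | botexe/testRequest.py | genEmojiMatrix
-- ===== SOURCE A (Python) =====
-- def genEmojiMatrix(emojiList):
--     eLen = len(emojiList) * 2 - 1
--     eList = [[0] * eLen for i in range(eLen)]
--     for index,item in enumerate(emojiList):
--         for i in range(eLen):
--             for j in range(eLen):
--                 if i==index or j==index:
--                     eList[i][j]=emojiList[index]
--     return eList
-- ===== SOURCE B (Python) =====
-- def genEmojiMatrix(emojiList):
--     n = len(emojiList)
--     eLen = 2 * n - 1
--     def cell(i, j):
--         hi, lo = (i, j) if i >= j else (j, i)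
--         if hi < n:
--             return emojiList[hi]
--         if lo < n:
--             return emojiList[lo]
--         return 0
--     return [[cell(i, j) for j in range(eLen)] for i in range(eLen)]
-- ===== Notes on version B (the rewrite author's own statement) =====
-- stated objective: faster
-- what changed: A rescans the whole (2n-1)x(2n-1) matrix once per emoji index (triple loop with last-writer-wins overwrites); B computes each cell directly in closed form (the emoji at the largest of {i,j} that is a valid index, else the smaller, else 0) in a single double loop.
import Mathlib
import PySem

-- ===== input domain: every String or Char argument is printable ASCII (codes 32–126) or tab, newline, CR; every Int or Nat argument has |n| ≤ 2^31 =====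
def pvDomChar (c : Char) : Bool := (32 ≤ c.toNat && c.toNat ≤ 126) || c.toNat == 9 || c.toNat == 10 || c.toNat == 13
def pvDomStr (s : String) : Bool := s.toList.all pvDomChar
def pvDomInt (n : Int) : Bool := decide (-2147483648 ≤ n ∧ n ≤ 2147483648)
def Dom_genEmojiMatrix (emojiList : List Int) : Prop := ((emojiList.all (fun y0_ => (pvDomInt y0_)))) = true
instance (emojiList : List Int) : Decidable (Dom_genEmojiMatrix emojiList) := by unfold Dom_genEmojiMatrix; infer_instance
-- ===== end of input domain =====

-- B replaces A's triple loop (each emoji index rescans the whole matrix) by a direct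
-- closed-form fill of each cell in a single double loop: faster (asymptotic, O(n^3) -> O(n^2)).

-- ===== PORT A =====
-- eList[i][j] = v, i and j always in range here (they come from range(eLen))
def pvSetCell (m : List (List Int)) (i j : Nat) (v : Int) : List (List Int) :=
  m.set i ((m.getD i []).set j v)

def genEmojiMatrix (emojiList : List Int) : List (List Int) :=
  let eLen : Int := (emojiList.length : Int) * 2 - 1
  let eList0 : List (List Int) :=
    (PySem.List.pyRange 0 eLen 1).map (fun _ =>
      (PySem.List.pyRange 0 eLen 1).map (fun _ => (0 : Int)))
  (PySem.List.enumerate emojiList 0).foldl (fun eList p =>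
    (PySem.List.pyRange 0 eLen 1).foldl (fun eList i =>
      (PySem.List.pyRange 0 eLen 1).foldl (fun eList j =>
        if i == p.1 || j == p.1 then
          -- emojiList[index]: index is an enumerate index, always in range, so getD is exact
          pvSetCell eList i.toNat j.toNat (PySem.List.pyGetD emojiList p.1 0)
        else eList) eList) eList) eList0

-- ===== PORT B =====
def genEmojiMatrix_alt (emojiList : List Int) : List (List Int) :=
  let n : Int := (emojiList.length : Int)
  let eLen : Int := 2 * n - 1
  (PySem.List.pyRange 0 eLen 1).map (fun i =>
    (PySem.List.pyRange 0 eLen 1).map (fun j =>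
      let hi : Int := if i ≥ j then i else j
      let lo : Int := if i ≥ j then j else i
      if hi < n then PySem.List.pyGetD emojiList hi 0
      else if lo < n then PySem.List.pyGetD emojiList lo 0
      else 0))

-- ===== PRECONDITION & SPEC =====
def Spec_genEmojiMatrix (emojiList : List Int) (out : List (List Int)) : Prop := out = genEmojiMatrix_alt emojiList
instance (emojiList : List Int) (out : List (List Int)) : Decidable (Spec_genEmojiMatrix emojiList out) := by unfold Spec_genEmojiMatrix; infer_instance

-- ===== CLAIM (what is proved, stated in full; the proofs are below) =====
def Claim_equal_genEmojiMatrix : Prop := ∀ (emojiList : List Int), Dom_genEmojiMatrix emojiList → Spec_genEmojiMatrix emojiList (genEmojiMatrix emojiList)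

-- ===== LEMMAS AND PROOFS =====

-- an N×N matrix given by a cell function
def pvGrid (N : Nat) (g : Nat → Nat → Int) : List (List Int) :=
  (List.range N).map (fun i => (List.range N).map (fun j => g i j))

theorem pvGrid_congr {N : Nat} {g1 g2 : Nat → Nat → Int}
    (h : ∀ a b, a < N → b < N → g1 a b = g2 a b) : pvGrid N g1 = pvGrid N g2 := by
  unfold pvGrid
  apply List.map_congr_left
  intro a ha
  apply List.map_congr_left
  intro b hb
  exact h a b (List.mem_range.mp ha) (List.mem_range.mp hb)

theorem set_map_range {α : Type} (N : Nat) (f : Nat → α) (j : Nat) (v : α) :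
    ((List.range N).map f).set j v = (List.range N).map (fun b => if b = j then v else f b) := by
  apply List.ext_getElem
  · simp
  · intro k h1 h2
    simp only [List.getElem_set, List.getElem_map, List.getElem_range]
    simp only [List.length_set, List.length_map, List.length_range] at h1
    split
    · simp_all
    · simp_all [eq_comm]

theorem pvSetCell_grid (N : Nat) (g : Nat → Nat → Int) (i j : Nat) (v : Int) (hi : i < N) :
    pvSetCell (pvGrid N g) i j v
      = pvGrid N (fun a b => if a = i ∧ b = j then v else g a b) := by
  unfold pvSetCell pvGrid
  have hrow : ((List.range N).map (fun i => (List.range N).map (fun j => g i j))).getD i []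
      = (List.range N).map (fun b => g i b) := by
    rw [List.getD_eq_getElem _ _ (by simpa using hi)]
    simp
  rw [hrow, set_map_range, set_map_range]
  apply List.map_congr_left
  intro a ha
  by_cases hai : a = i
  · subst hai
    rw [if_pos rfl]
    apply List.map_congr_left
    intro b hb
    by_cases hbj : b = j <;> simp [hbj]
  · rw [if_neg hai]
    apply List.map_congr_left
    intro b hb
    simp [hai]

-- inner loop over j for a fixed row i
theorem inner_fold (N : Nat) (i : Nat) (idx v : Int) (g : Nat → Nat → Int) (hi : i < N) :
    ∀ (M : Nat), M ≤ N →
    (List.range M).foldl (fun acc (j : Nat) =>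
        if ((i : Int) = idx ∨ (j : Int) = idx) then pvSetCell acc i j v else acc) (pvGrid N g)
      = pvGrid N (fun a b =>
          if a = i ∧ ((i : Int) = idx ∨ (b : Int) = idx) ∧ b < M then v else g a b) := by
  intro M
  induction M with
  | zero =>
      intro _
      simp only [List.range_zero, List.foldl_nil]
      apply pvGrid_congr; intro a b _ _; simp
  | succ M ih =>
      intro hM
      rw [List.range_succ, List.foldl_append, ih (by omega), List.foldl_cons, List.foldl_nil]
      by_cases hc : ((i : Int) = idx ∨ ((M : Nat) : Int) = idx)
      · rw [if_pos hc, pvSetCell_grid N _ i M v hi]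
        apply pvGrid_congr
        intro a b ha hb
        by_cases h1 : a = i ∧ b = M
        · obtain ⟨rfl, rfl⟩ := h1
          simp [hc]
        · rw [if_neg h1]
          by_cases h2 : a = i ∧ ((i : Int) = idx ∨ (b : Int) = idx) ∧ b < M
          · rw [if_pos h2, if_pos ⟨h2.1, h2.2.1, by omega⟩]
          · rw [if_neg h2, if_neg (by
              rintro ⟨rfl, hd, hbM⟩
              rcases Nat.lt_succ_iff_lt_or_eq.mp hbM with h | rfl
              · exact h2 ⟨rfl, hd, h⟩
              · exact h1 ⟨rfl, rfl⟩)]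
      · rw [if_neg hc]
        apply pvGrid_congr
        intro a b ha hb
        by_cases h2 : a = i ∧ ((i : Int) = idx ∨ (b : Int) = idx) ∧ b < M
        · rw [if_pos h2, if_pos ⟨h2.1, h2.2.1, by omega⟩]
        · rw [if_neg h2, if_neg (by
            rintro ⟨rfl, hd, hbM⟩
            rcases Nat.lt_succ_iff_lt_or_eq.mp hbM with h | rfl
            · exact h2 ⟨rfl, hd, h⟩
            · rcases hd with hd | hd
              · exact hc (Or.inl hd)
              · exact hc (Or.inr hd))]

-- outer double loop for one enumerate step
theorem outer_fold (N : Nat) (idx v : Int) (g : Nat → Nat → Int) :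
    ∀ (M : Nat), M ≤ N →
    (List.range M).foldl (fun acc (i : Nat) =>
        (List.range N).foldl (fun acc (j : Nat) =>
          if ((i : Int) = idx ∨ (j : Int) = idx) then pvSetCell acc i j v else acc) acc) (pvGrid N g)
      = pvGrid N (fun a b =>
          if a < M ∧ ((a : Int) = idx ∨ (b : Int) = idx) then v else g a b) := by
  intro M
  induction M with
  | zero =>
      intro _
      simp only [List.range_zero, List.foldl_nil]
      apply pvGrid_congr; intro a b _ _; simp
  | succ M ih =>
      intro hM
      rw [List.range_succ, List.foldl_append, ih (by omega), List.foldl_cons, List.foldl_nil,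
        inner_fold N M idx v _ (by omega) N (le_refl N)]
      apply pvGrid_congr
      intro a b ha hb
      by_cases h1 : a = M ∧ (((M : Nat) : Int) = idx ∨ (b : Int) = idx) ∧ b < N
      · obtain ⟨rfl, hd, _⟩ := h1
        rw [if_pos ⟨rfl, hd, ‹b < N›⟩, if_pos ⟨by omega, hd⟩]
      · rw [if_neg h1]
        by_cases h2 : a < M ∧ ((a : Int) = idx ∨ (b : Int) = idx)
        · rw [if_pos h2, if_pos ⟨by omega, h2.2⟩]
        · rw [if_neg h2, if_neg (by
            rintro ⟨haM, hd⟩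
            rcases Nat.lt_succ_iff_lt_or_eq.mp haM with h | rfl
            · exact h2 ⟨h, hd⟩
            · exact h1 ⟨rfl, hd, hb⟩)]

-- the value of a cell after processing all indices in [s, t)
def pvCell (el : List Int) (s t : Int) (g : Nat → Nat → Int) (a b : Nat) : Int :=
  if s ≤ ((max a b : Nat) : Int) ∧ ((max a b : Nat) : Int) < t then
    PySem.List.pyGetD el ((max a b : Nat) : Int) 0
  else if s ≤ ((min a b : Nat) : Int) ∧ ((min a b : Nat) : Int) < t then
    PySem.List.pyGetD el ((min a b : Nat) : Int) 0
  else g a b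

theorem enum_fold (el : List Int) (N : Nat) :
    ∀ (ys : List Int) (s : Int) (g : Nat → Nat → Int), 0 ≤ s →
    (PySem.List.enumerate ys s).foldl (fun eList p =>
      (List.range N).foldl (fun acc (i : Nat) =>
        (List.range N).foldl (fun acc (j : Nat) =>
          if ((i : Int) = p.1 ∨ (j : Int) = p.1) then
            pvSetCell acc i j (PySem.List.pyGetD el p.1 0) else acc) acc) eList) (pvGrid N g)
      = pvGrid N (pvCell el s (s + ys.length) g) := by
  intro ys
  induction ys with
  | nil =>
      intro s g hs
      simp only [PySem.List.enumerate_nil, List.foldl_nil, List.length_nil, Nat.cast_zero,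
        add_zero]
      apply pvGrid_congr
      intro a b _ _
      unfold pvCell
      rw [if_neg (by omega), if_neg (by omega)]
  | cons x xs ih =>
      intro s g hs
      rw [PySem.List.enumerate_cons, List.foldl_cons,
        outer_fold N s (PySem.List.pyGetD el s 0) g N (le_refl N),
        ih (s + 1) _ (by omega)]
      apply pvGrid_congr
      intro a b ha hb
      unfold pvCell
      have hab : (min a b : Nat) ≤ (max a b : Nat) := min_le_max
      simp only [List.length_cons]
      by_cases hM1 : s + 1 ≤ ((max a b : Nat) : Int) ∧ ((max a b : Nat) : Int) < s + 1 + (xs.length : Int)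
      · rw [if_pos hM1, if_pos ⟨by omega, by push_cast; omega⟩]
      · rw [if_neg hM1]
        by_cases hm1 : s + 1 ≤ ((min a b : Nat) : Int) ∧ ((min a b : Nat) : Int) < s + 1 + (xs.length : Int)
        · rw [if_pos hm1, if_neg (by omega), if_pos ⟨by omega, by push_cast; omega⟩]
        · rw [if_neg hm1]
          by_cases hMs : ((max a b : Nat) : Int) = s
          · rw [if_pos (by
              refine ⟨by omega, ?_⟩
              rcases max_cases a b with ⟨h1, _⟩ | ⟨h1, _⟩ <;>
                [exact Or.inl (by rw [h1] at hMs; exact hMs);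
                 exact Or.inr (by rw [h1] at hMs; exact hMs)]),
              if_pos (by push_cast; omega), hMs]
          · by_cases hms : ((min a b : Nat) : Int) = s
            · rw [if_pos (by
                refine ⟨by omega, ?_⟩
                rcases min_cases a b with ⟨h1, _⟩ | ⟨h1, _⟩ <;>
                  [exact Or.inl (by rw [h1] at hms; exact hms);
                   exact Or.inr (by rw [h1] at hms; exact hms)]),
                if_neg (by omega), if_pos (by push_cast; omega), hms]
            · rw [if_neg (by
                rintro ⟨ha', (h | h)⟩
                · rcases max_cases a b with ⟨h1, h2⟩ | ⟨h1, h2⟩ <;> omega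
                · rcases max_cases a b with ⟨h1, h2⟩ | ⟨h1, h2⟩ <;> omega),
                if_neg (by push_cast; omega), if_neg (by push_cast; omega)]

theorem pyRange_to_range (e : Int) :
    PySem.List.pyRange 0 e 1 = (List.range e.toNat).map (Nat.cast : Nat → Int) := by
  rw [PySem.List.pyRange_one]
  have h : (e - 0).toNat = e.toNat := by omega
  rw [h]
  apply List.map_congr_left
  intro k _
  omega

theorem a_eq_grid (el : List Int) :
    genEmojiMatrix el
      = pvGrid ((el.length : Int) * 2 - 1).toNat
          (pvCell el 0 (0 + (el.length : Int)) (fun _ _ => 0)) := by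
  unfold genEmojiMatrix
  simp only [pyRange_to_range, List.map_map, List.foldl_map, Int.toNat_natCast,
    Bool.or_eq_true, beq_iff_eq]
  rw [show (List.range ((el.length : Int) * 2 - 1).toNat).map
        ((fun _ => (List.range ((el.length : Int) * 2 - 1).toNat).map
          ((fun _ => (0 : Int)) ∘ (Nat.cast : Nat → Int))) ∘ (Nat.cast : Nat → Int))
      = pvGrid ((el.length : Int) * 2 - 1).toNat (fun _ _ => 0) from rfl]
  rw [enum_fold el ((el.length : Int) * 2 - 1).toNat el 0 (fun _ _ => 0) (le_refl 0)]

theorem alt_eq_grid (el : List Int) :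
    genEmojiMatrix_alt el
      = pvGrid (2 * (el.length : Int) - 1).toNat
          (fun a b =>
            if ((max a b : Nat) : Int) < (el.length : Int) then
              PySem.List.pyGetD el ((max a b : Nat) : Int) 0
            else if ((min a b : Nat) : Int) < (el.length : Int) then
              PySem.List.pyGetD el ((min a b : Nat) : Int) 0
            else 0) := by
  unfold genEmojiMatrix_alt pvGrid
  simp only [pyRange_to_range, List.map_map]
  apply List.map_congr_left
  intro a _
  simp only [Function.comp_apply]
  apply List.map_congr_left
  intro b _
  simp only [Function.comp_apply, ge_iff_le]
  have hhi : (if ((b : Int)) ≤ ((a : Int)) then ((a : Int)) else ((b : Int)))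
      = ((max a b : Nat) : Int) := by
    rcases Nat.lt_or_ge a b with h | h
    · rw [if_neg (by exact_mod_cast Nat.not_le.mpr h), Nat.max_eq_right (le_of_lt h)]
    · rw [if_pos (by exact_mod_cast h), Nat.max_eq_left h]
  have hlo : (if ((b : Int)) ≤ ((a : Int)) then ((b : Int)) else ((a : Int)))
      = ((min a b : Nat) : Int) := by
    rcases Nat.lt_or_ge a b with h | h
    · rw [if_neg (by exact_mod_cast Nat.not_le.mpr h), Nat.min_eq_left (le_of_lt h)]
    · rw [if_pos (by exact_mod_cast h), Nat.min_eq_right h]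
  rw [hhi, hlo]

-- ===== VERDICT (by name: the statement is the Claim_ definition above) =====
theorem genEmojiMatrix_spec : Claim_equal_genEmojiMatrix := by
  intro el _
  unfold Spec_genEmojiMatrix
  rw [a_eq_grid, alt_eq_grid]
  rw [show (2 * (el.length : Int) - 1).toNat = ((el.length : Int) * 2 - 1).toNat by omega]
  apply pvGrid_congr
  intro a b ha hb
  unfold pvCell
  split_ifs <;> first | rfl | omega
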